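-- pv_equiv track=rewrite | github.com/Shevaliero/Laba-10 | #3.py | maxi
-- ===== SOURCE A (Python) =====
-- def maxi(a,n,m,mx,mxn,mxm):
--     l=len(a)
--     for i in range(l):
--         for j in range(l):
--             if a[i][j]>mx:
--                 mx=a[i][j]
--                 mxn=i
--                 mxm=j
--     return mx,mxn,mxm
-- ===== SOURCE B (Python) =====
-- def maxi(a, n, m, mx, mxn, mxm):
--     # Pass 1: find the largest value, starting from mx (no index tracking).
--     l = len(a)
--     best = mx
--     for i in range(l):
--         for j in range(l):
--             if a[i][j] > best:
--                 best = a[i][j]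
--     # Pass 2: if something beat mx, locate its first occurrence (row-major).
--     if best > mx:
--         for i in range(l):
--             for j in range(l):
--                 if a[i][j] == best:
--                     return best, i, j
--     return mx, mxn, mxm
-- ===== Notes on version B (the rewrite author's own statement) =====
-- stated objective: alternative
-- what changed: Replaces A's single combined scan that updates (mx,mxn,mxm) together with a two-pass decomposition: one pass computes only the maximum value, then a second pass locates its first row-major occurrence (or returns the defaults unchanged if nothing beat mx).
import Mathlib
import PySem

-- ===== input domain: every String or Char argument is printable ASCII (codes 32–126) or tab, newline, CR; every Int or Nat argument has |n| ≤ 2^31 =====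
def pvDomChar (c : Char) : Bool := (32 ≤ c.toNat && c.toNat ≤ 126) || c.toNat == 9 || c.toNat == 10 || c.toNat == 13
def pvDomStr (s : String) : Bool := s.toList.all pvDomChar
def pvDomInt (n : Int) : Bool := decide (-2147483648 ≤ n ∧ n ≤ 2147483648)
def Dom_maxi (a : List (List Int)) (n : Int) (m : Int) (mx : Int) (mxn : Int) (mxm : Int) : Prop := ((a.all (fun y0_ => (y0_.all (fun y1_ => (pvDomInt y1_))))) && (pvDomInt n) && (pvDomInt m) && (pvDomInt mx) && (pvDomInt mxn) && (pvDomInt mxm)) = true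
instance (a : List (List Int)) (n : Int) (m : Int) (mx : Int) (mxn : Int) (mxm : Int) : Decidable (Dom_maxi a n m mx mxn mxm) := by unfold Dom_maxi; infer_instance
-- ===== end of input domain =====

-- B replaces A's single combined scan with a two-pass decomposition (find the max value, then locate
-- its first row-major occurrence); same cost, proved to return the same triple (objective: alternative).


-- ===== PORT A =====
-- a[i][j] (both indices produced by range(l), so non-negative and in range under Pre_);
-- exact via PySem.List.pyGet?, with a default that Pre_ makes unreachable
def pvCell (a : List (List Int)) (i j : Int) : Int :=
  (PySem.List.pyGet? ((PySem.List.pyGet? a i).getD []) j).getD 0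

def maxi (a : List (List Int)) (n : Int) (m : Int) (mx : Int) (mxn : Int) (mxm : Int) : Int × Int × Int :=
  let l : Int := a.length
  (PySem.List.pyRange 0 l 1).foldl (fun s i =>
    (PySem.List.pyRange 0 l 1).foldl (fun s j =>
      if pvCell a i j > s.1 then (pvCell a i j, i, j) else s) s) (mx, mxn, mxm)

-- ===== PORT B =====
def maxi_alt (a : List (List Int)) (n : Int) (m : Int) (mx : Int) (mxn : Int) (mxm : Int) : Int × Int × Int :=
  let l : Int := a.length
  let best : Int :=
    (PySem.List.pyRange 0 l 1).foldl (fun b i =>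
      (PySem.List.pyRange 0 l 1).foldl (fun b j =>
        if pvCell a i j > b then pvCell a i j else b) b) mx
  if best > mx then
    -- second pass: first (i, j) in row-major order with a[i][j] == best
    match ((PySem.List.pyRange 0 l 1).flatMap (fun i =>
             (PySem.List.pyRange 0 l 1).map (fun j => (i, j)))).find?
            (fun p => pvCell a p.1 p.2 == best) with
    | some p => (best, p.1, p.2)
    | none => (mx, mxn, mxm)
  else (mx, mxn, mxm)

-- ===== PRECONDITION & SPEC =====
-- Pre_ excludes ragged inputs (a row shorter than len(a)), on which Python A raises IndexError
-- because both column and row indices run over range(len(a)).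
def Pre_maxi (a : List (List Int)) (n : Int) (m : Int) (mx : Int) (mxn : Int) (mxm : Int) : Prop :=
  ∀ r ∈ a, a.length ≤ r.length
instance (a : List (List Int)) (n : Int) (m : Int) (mx : Int) (mxn : Int) (mxm : Int) : Decidable (Pre_maxi a n m mx mxn mxm) := by unfold Pre_maxi; infer_instance

def pvWitness_maxi : List (List Int) × Int × Int × Int × Int × Int := ([[1, 2], [3, 4]], 2, 2, 0, 0, 0)

def Spec_maxi (a : List (List Int)) (n : Int) (m : Int) (mx : Int) (mxn : Int) (mxm : Int) (out : Int × Int × Int) : Prop := out = maxi_alt a n m mx mxn mxm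
instance (a : List (List Int)) (n : Int) (m : Int) (mx : Int) (mxn : Int) (mxm : Int) (out : Int × Int × Int) : Decidable (Spec_maxi a n m mx mxn mxm out) := by unfold Spec_maxi; infer_instance

-- ===== CLAIM (what is proved, stated in full; the proofs are below) =====
def Claim_equal_maxi : Prop := ∀ (a : List (List Int)) (n : Int) (m : Int) (mx : Int) (mxn : Int) (mxm : Int), Dom_maxi a n m mx mxn mxm → Pre_maxi a n m mx mxn mxm → Spec_maxi a n m mx mxn mxm (maxi a n m mx mxn mxm)

-- ===== LEMMAS AND PROOFS =====

-- the value of the max-only pass over a flat list of cell coordinates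
def runMax (v : Int × Int → Int) (c : Int) (ps : List (Int × Int)) : Int :=
  ps.foldl (fun b p => if v p > b then v p else b) c

theorem nest {σ : Type} (f : σ → Int × Int → σ) (rows cols : List Int) (s : σ) :
    rows.foldl (fun s i => cols.foldl (fun s j => f s (i, j)) s) s
      = (rows.flatMap (fun i => cols.map (fun j => (i, j)))).foldl f s := by
  induction rows generalizing s with
  | nil => rfl
  | cons r rs ih =>
      simp [List.flatMap_cons, List.foldl_append, List.foldl_map, ih]

theorem runMax_mono (v : Int × Int → Int) (ps : List (Int × Int)) :
    ∀ c : Int, c ≤ runMax v c ps := by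
  induction ps with
  | nil => intro c; exact le_refl c
  | cons p ps ih =>
      intro c
      refine le_trans ?_ (ih (if v p > c then v p else c))
      split <;> omega

theorem runMax_attained (v : Int × Int → Int) (ps : List (Int × Int)) :
    ∀ c : Int, runMax v c ps = c ∨ ∃ p ∈ ps, v p = runMax v c ps := by
  induction ps with
  | nil => intro c; exact Or.inl rfl
  | cons p ps ih =>
      intro c
      rcases ih (if v p > c then v p else c) with h | ⟨q, hq, hv⟩
      · by_cases hc : v p > c
        · right
          exact ⟨p, List.mem_cons_self, by simp [runMax, hc] at h ⊢; omega⟩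
        · left; simpa [runMax, hc] using h
      · right; exact ⟨q, List.mem_cons_of_mem _ hq, by simpa [runMax] using hv⟩

theorem scan_eq (v : Int × Int → Int) (ps : List (Int × Int)) :
    ∀ s : Int × Int × Int,
      ps.foldl (fun s p => if v p > s.1 then (v p, p.1, p.2) else s) s
        = if runMax v s.1 ps > s.1 then
            match ps.find? (fun p => v p == runMax v s.1 ps) with
            | some p => (runMax v s.1 ps, p.1, p.2)
            | none => s
          else s := by
  induction ps with
  | nil => intro s; simp [runMax]
  | cons p ps ih =>
      intro s
      by_cases h : v p > s.1
      · have hstep : runMax v s.1 (p :: ps) = runMax v (v p) ps := by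
          simp [runMax, h]
        have hmono := runMax_mono v ps (v p)
        have hgt : runMax v (v p) ps > s.1 := by omega
        simp only [List.foldl_cons, if_pos h]
        rw [ih (v p, p.1, p.2)]
        simp only [hstep]
        by_cases heq : runMax v (v p) ps = v p
        · simp [heq, h]
        · have hlt : runMax v (v p) ps > v p := by omega
          have hhead : (v p == runMax v (v p) ps) = false := by
            simp; omega
          have hsome : (ps.find? (fun q => v q == runMax v (v p) ps)).isSome := by
            rcases runMax_attained v ps (v p) with h' | ⟨q, hq, hv⟩
            · omega
            · exact List.find?_isSome.mpr ⟨q, hq, by simp [hv]⟩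
          rcases Option.isSome_iff_exists.mp hsome with ⟨q, hfind⟩
          simp [hlt, hgt, hhead, hfind]
      · have hstep : runMax v s.1 (p :: ps) = runMax v s.1 ps := by
          simp [runMax, h]
        simp only [List.foldl_cons, if_neg h]
        rw [ih s]
        simp only [hstep]
        by_cases hgt : runMax v s.1 ps > s.1
        · have hhead : (v p == runMax v s.1 ps) = false := by
            simp; omega
          simp [hgt, hhead]
        · simp [hgt]

-- specialized instances of `nest`/`scan_eq` at the ports' exact loop bodies (proved by defeq)
theorem flatA (a : List (List Int)) (mx mxn mxm : Int) :
    (PySem.List.pyRange 0 (a.length : Int) 1).foldl (fun s i =>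
      (PySem.List.pyRange 0 (a.length : Int) 1).foldl (fun s j =>
        if pvCell a i j > s.1 then (pvCell a i j, i, j) else s) s) ((mx, mxn, mxm) : Int × Int × Int)
    = ((PySem.List.pyRange 0 (a.length : Int) 1).flatMap (fun i =>
        (PySem.List.pyRange 0 (a.length : Int) 1).map (fun j => (i, j)))).foldl
        (fun s p => if pvCell a p.1 p.2 > s.1 then (pvCell a p.1 p.2, p.1, p.2) else s) (mx, mxn, mxm) :=
  nest (fun s p => if pvCell a p.1 p.2 > s.1 then (pvCell a p.1 p.2, p.1, p.2) else s) _ _ _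

theorem flatB (a : List (List Int)) (mx : Int) :
    (PySem.List.pyRange 0 (a.length : Int) 1).foldl (fun b i =>
      (PySem.List.pyRange 0 (a.length : Int) 1).foldl (fun b j =>
        if pvCell a i j > b then pvCell a i j else b) b) mx
    = ((PySem.List.pyRange 0 (a.length : Int) 1).flatMap (fun i =>
        (PySem.List.pyRange 0 (a.length : Int) 1).map (fun j => (i, j)))).foldl
        (fun b p => if pvCell a p.1 p.2 > b then pvCell a p.1 p.2 else b) mx :=
  nest (fun b p => if pvCell a p.1 p.2 > b then pvCell a p.1 p.2 else b) _ _ _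

theorem scanA (a : List (List Int)) (mx mxn mxm : Int) :
    ((PySem.List.pyRange 0 (a.length : Int) 1).flatMap (fun i =>
        (PySem.List.pyRange 0 (a.length : Int) 1).map (fun j => (i, j)))).foldl
        (fun s p => if pvCell a p.1 p.2 > s.1 then (pvCell a p.1 p.2, p.1, p.2) else s) (mx, mxn, mxm)
    = (if ((PySem.List.pyRange 0 (a.length : Int) 1).flatMap (fun i =>
            (PySem.List.pyRange 0 (a.length : Int) 1).map (fun j => (i, j)))).foldl
            (fun b p => if pvCell a p.1 p.2 > b then pvCell a p.1 p.2 else b) mx > mx then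
        (match ((PySem.List.pyRange 0 (a.length : Int) 1).flatMap (fun i =>
                  (PySem.List.pyRange 0 (a.length : Int) 1).map (fun j => (i, j)))).find?
                (fun p => pvCell a p.1 p.2 ==
                  ((PySem.List.pyRange 0 (a.length : Int) 1).flatMap (fun i =>
                    (PySem.List.pyRange 0 (a.length : Int) 1).map (fun j => (i, j)))).foldl
                    (fun b p => if pvCell a p.1 p.2 > b then pvCell a p.1 p.2 else b) mx) with
          | some p => (((PySem.List.pyRange 0 (a.length : Int) 1).flatMap (fun i =>
                        (PySem.List.pyRange 0 (a.length : Int) 1).map (fun j => (i, j)))).foldl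
                        (fun b p => if pvCell a p.1 p.2 > b then pvCell a p.1 p.2 else b) mx, p.1, p.2)
          | none => ((mx, mxn, mxm) : Int × Int × Int))
      else (mx, mxn, mxm)) :=
  scan_eq (fun p => pvCell a p.1 p.2) _ (mx, mxn, mxm)

-- ===== VERDICT (by name: the statement is the Claim_ definition above) =====
theorem maxi_spec : Claim_equal_maxi := by
  intro a n m mx mxn mxm _ _
  show (PySem.List.pyRange 0 (a.length : Int) 1).foldl (fun s i =>
      (PySem.List.pyRange 0 (a.length : Int) 1).foldl (fun s j =>
        if pvCell a i j > s.1 then (pvCell a i j, i, j) else s) s) ((mx, mxn, mxm) : Int × Int × Int)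
    = (if (PySem.List.pyRange 0 (a.length : Int) 1).foldl (fun b i =>
            (PySem.List.pyRange 0 (a.length : Int) 1).foldl (fun b j =>
              if pvCell a i j > b then pvCell a i j else b) b) mx > mx then
        (match ((PySem.List.pyRange 0 (a.length : Int) 1).flatMap (fun i =>
                  (PySem.List.pyRange 0 (a.length : Int) 1).map (fun j => (i, j)))).find?
                (fun p => pvCell a p.1 p.2 ==
                  (PySem.List.pyRange 0 (a.length : Int) 1).foldl (fun b i =>
                    (PySem.List.pyRange 0 (a.length : Int) 1).foldl (fun b j =>
                      if pvCell a i j > b then pvCell a i j else b) b) mx) with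
          | some p => ((PySem.List.pyRange 0 (a.length : Int) 1).foldl (fun b i =>
                        (PySem.List.pyRange 0 (a.length : Int) 1).foldl (fun b j =>
                          if pvCell a i j > b then pvCell a i j else b) b) mx, p.1, p.2)
          | none => ((mx, mxn, mxm) : Int × Int × Int))
      else (mx, mxn, mxm))
  rw [flatB a mx]
  exact (flatA a mx mxn mxm).trans (scanA a mx mxn mxm)
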